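-- pv_equiv track=rewrite | github.com/sayydaviid/Prog1 | lista da prova do hidaka 1av.py | questao11
-- ===== SOURCE A (Python) =====
-- def questao11(lista):
--     """
--     >>> questao11(lista)
--     6
--     """
--     lista3 = []
--     for i in lista:
--         if i == 1:
--             lista3.append(2)
--         elif i == 2:
--             lista3.append(3)
--         elif i == 3:
--             lista3.append(3)
--         elif i == 4:
--             lista3.append(5)
--         elif i == 5:
--             lista3.append(5)
--         elif i == 6:
--             lista3.append(7)
--         elif i == 7:
--             lista3.append(7)
--         elif i == 8:
--             lista3.append(11)
--         elif i == 9: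
--             lista3.append(11)
--     return lista3.index(max(lista3))
-- ===== SOURCE B (Python) =====
-- def questao11(lista):
--     table = {1: 2, 2: 3, 3: 3, 4: 5, 5: 5, 6: 7, 7: 7, 8: 11, 9: 11}
--     j = 0
--     best = None  # (value, index) of the running maximum of the mapped sequence
--     for x in lista:
--         v = table.get(x)
--         if v is not None:
--             if best is None or v > best[0]:
--                 best = (v, j)
--             j += 1
--     if best is None:
--         raise ValueError("max() arg is an empty sequence")
--     return best[1]
-- ===== Notes on version B (the rewrite author's own statement) =====
-- stated objective: alternative
-- what changed: B replaces A's build-a-mapped-list-then-max-then-index three-pass structure by a single pass that keeps a filtered-position counter and a running (best value, best index) via a lookup table, never materialising the mapped list.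
import Mathlib
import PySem

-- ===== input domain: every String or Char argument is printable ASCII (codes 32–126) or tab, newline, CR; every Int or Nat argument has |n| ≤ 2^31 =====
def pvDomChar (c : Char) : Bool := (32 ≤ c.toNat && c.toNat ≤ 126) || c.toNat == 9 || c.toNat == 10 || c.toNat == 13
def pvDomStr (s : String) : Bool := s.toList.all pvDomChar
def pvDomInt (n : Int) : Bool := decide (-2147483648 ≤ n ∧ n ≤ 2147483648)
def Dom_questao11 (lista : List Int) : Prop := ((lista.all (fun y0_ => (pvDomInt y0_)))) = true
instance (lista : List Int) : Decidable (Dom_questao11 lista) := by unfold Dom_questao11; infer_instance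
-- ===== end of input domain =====

-- B is a single pass keeping a filtered-position counter and a running (best value, best index);
-- A builds the mapped list and then runs max and index over it.

-- ===== PORT A =====
-- the loop body: the elif chain appending the mapped value
def questao11_step (acc : List Int) (i : Int) : List Int :=
  if i == 1 then acc ++ [2]
  else if i == 2 then acc ++ [3]
  else if i == 3 then acc ++ [3]
  else if i == 4 then acc ++ [5]
  else if i == 5 then acc ++ [5]
  else if i == 6 then acc ++ [7]
  else if i == 7 then acc ++ [7]
  else if i == 8 then acc ++ [11]
  else if i == 9 then acc ++ [11]
  else acc

def questao11 (lista : List Int) : Int :=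
  let lista3 := lista.foldl questao11_step []
  match PySem.List.max? lista3 (fun x => x) with
  | none => 0              -- max([]) raises ValueError; excluded by Pre_
  | some m => ((PySem.List.index? lista3 m).getD 0 : Nat)

-- ===== PORT B =====
def questao11_table : PySem.Dict Int Int :=
  PySem.Dict.ofList [(1, 2), (2, 3), (3, 3), (4, 5), (5, 5), (6, 7), (7, 7), (8, 11), (9, 11)]

-- one loop iteration of B: state = (j, best)
def questao11_alt_step (s : Int × Option (Int × Int)) (x : Int) : Int × Option (Int × Int) :=
  match questao11_table.get? x with
  | none => s
  | some v =>
    match s.2 with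
    | none => (s.1 + 1, some (v, s.1))
    | some (bv, bi) => (s.1 + 1, if v > bv then some (v, s.1) else some (bv, bi))

def questao11_alt (lista : List Int) : Int :=
  match (lista.foldl questao11_alt_step (0, none)).2 with
  | none => 0              -- raise ValueError; excluded by Pre_
  | some (_, bi) => bi

-- ===== PRECONDITION & SPEC =====
-- Pre_ excludes exactly the inputs with no element in 1..9: there A raises ValueError (max of the
-- empty mapped list) and B raises ValueError as well.
def Pre_questao11 (lista : List Int) : Prop :=
  (lista.any (fun x => decide (1 ≤ x ∧ x ≤ 9))) = true
instance (lista : List Int) : Decidable (Pre_questao11 lista) := by unfold Pre_questao11; infer_instance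
def pvWitness_questao11 : List Int := [0, 3, 7, 2]

def Spec_questao11 (lista : List Int) (out : Int) : Prop := out = questao11_alt lista
instance (lista : List Int) (out : Int) : Decidable (Spec_questao11 lista out) := by unfold Spec_questao11; infer_instance

-- ===== CLAIM (what is proved, stated in full; the proofs are below) =====
def Claim_equal_questao11 : Prop := ∀ (lista : List Int), Dom_questao11 lista → Pre_questao11 lista → Spec_questao11 lista (questao11 lista)

-- ===== LEMMAS AND PROOFS =====

-- the mapping table as a plain function
def pvF (x : Int) : Option Int :=
  if x == 1 then some 2
  else if x == 2 then some 3
  else if x == 3 then some 3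
  else if x == 4 then some 5
  else if x == 5 then some 5
  else if x == 6 then some 7
  else if x == 7 then some 7
  else if x == 8 then some 11
  else if x == 9 then some 11
  else none

-- (value, first index) of the maximum of a list, tie towards the front
def pvFM : List Int → Option (Int × Nat)
  | [] => none
  | x :: t =>
    match pvFM t with
    | none => some (x, 0)
    | some (m, i) => if x < m then some (m, i + 1) else some (x, 0)

-- the B loop once its best is a pair (the Option never goes back to none)
def pvAct (s : Int × Int × Int) (v : Int) : Int × Int × Int :=
  (s.1 + 1, if v > s.2.1 then (v, s.1) else s.2)

theorem pvF_table (x : Int) : questao11_table.get? x = pvF x := by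
  have h : questao11_table =
      PySem.Dict.mk [(1, 2), (2, 3), (3, 3), (4, 5), (5, 5), (6, 7), (7, 7), (8, 11), (9, 11)] := by
    decide
  rw [h]
  simp only [PySem.Dict.get?_mk_cons, pvF]
  norm_num [PySem.Dict.get?, PySem.Dict.empty]
  by_cases h1 : x = 1; · simp [h1]
  by_cases h2 : x = 2; · simp [h2]
  by_cases h3 : x = 3; · simp [h3]
  by_cases h4 : x = 4; · simp [h4]
  by_cases h5 : x = 5; · simp [h5]
  by_cases h6 : x = 6; · simp [h6]
  by_cases h7 : x = 7; · simp [h7]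
  by_cases h8 : x = 8; · simp [h8]
  by_cases h9 : x = 9; · simp [h9]
  simp [h1, h2, h3, h4, h5, h6, h7, h8, h9, Ne.symm h1, Ne.symm h2, Ne.symm h3, Ne.symm h4,
    Ne.symm h5, Ne.symm h6, Ne.symm h7, Ne.symm h8, Ne.symm h9]

theorem pvA_list (l : List Int) (acc : List Int) :
    l.foldl questao11_step acc = acc ++ l.flatMap (fun x => (pvF x).toList) := by
  induction l generalizing acc with
  | nil => simp
  | cons x t ih =>
    have hx : questao11_step acc x = acc ++ (pvF x).toList := by
      simp only [questao11_step, pvF]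
      split_ifs <;> simp
    simp [List.foldl_cons, ih, hx]

theorem pvFoldl_max_max (t : List Int) (a b : Int) :
    t.foldl max (max a b) = max a (t.foldl max b) := by
  induction t generalizing b with
  | nil => simp
  | cons y u ih => simp [List.foldl_cons, max_assoc, ih]

theorem pvFM_spec (l : List Int) (x : Int) :
    ∃ m i, pvFM (x :: l) = some (m, i) ∧ m = l.foldl max x ∧
      PySem.List.index? (x :: l) m = some i := by
  induction l generalizing x with
  | nil =>
    exact ⟨x, 0, by simp [pvFM], by simp, by simp [PySem.List.index?]⟩
  | cons y t ih =>
    obtain ⟨m, i, hfm, hmax, hidx⟩ := ih y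
    by_cases hx : x < m
    · refine ⟨m, i + 1, ?_, ?_, ?_⟩
      · rw [pvFM.eq_def]
        simp only [hfm]
        simp [hx]
      · symm
        calc (y :: t).foldl max x = t.foldl max (max x y) := by simp
          _ = max x (t.foldl max y) := pvFoldl_max_max t x y
          _ = t.foldl max y := by rw [hmax] at hx; omega
          _ = m := hmax.symm
      · have hne : x ≠ m := by omega
        rw [PySem.List.index?_cons_of_ne (y :: t) hne, hidx]
        rfl
    · refine ⟨x, 0, ?_, ?_, ?_⟩
      · rw [pvFM.eq_def]
        simp only [hfm]
        simp [hx]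
      · symm
        calc (y :: t).foldl max x = t.foldl max (max x y) := by simp
          _ = max x (t.foldl max y) := pvFoldl_max_max t x y
          _ = x := by rw [← hmax]; omega
      · exact PySem.List.index?_cons_self x (y :: t)

theorem pvB_flat (l : List Int) (s : Int × Option (Int × Int)) :
    l.foldl questao11_alt_step s =
      (l.flatMap (fun x => (pvF x).toList)).foldl
        (fun s v => match s.2 with
          | none => (s.1 + 1, some (v, s.1))
          | some (bv, bi) => (s.1 + 1, if v > bv then some (v, s.1) else some (bv, bi))) s := by
  induction l generalizing s with
  | nil => rfl
  | cons x t ih =>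
    rw [List.foldl_cons, ih, List.flatMap_cons, List.foldl_append]
    congr 1
    simp only [questao11_alt_step, pvF_table]
    cases pvF x <;> rfl

theorem pvAct_some (l : List Int) (j bv bi : Int) :
    l.foldl (fun (s : Int × Option (Int × Int)) v => match s.2 with
          | none => (s.1 + 1, some (v, s.1))
          | some (bv, bi) => (s.1 + 1, if v > bv then some (v, s.1) else some (bv, bi)))
        (j, some (bv, bi))
      = ((l.foldl pvAct (j, bv, bi)).1, some (l.foldl pvAct (j, bv, bi)).2) := by
  induction l generalizing j bv bi with
  | nil => rfl
  | cons v t ih =>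
    rw [List.foldl_cons, List.foldl_cons]
    by_cases hv : v > bv
    · simpa [pvAct, hv] using ih (j + 1) v j
    · simpa [pvAct, hv] using ih (j + 1) bv bi

theorem pvFM_ne_none (x : Int) (t : List Int) : pvFM (x :: t) ≠ none := by
  rw [pvFM.eq_def]
  cases hp : pvFM t with
  | none => simp [hp]
  | some p => obtain ⟨m, i⟩ := p; by_cases h : x < m <;> simp [hp, h]

theorem pvAct_spec (l : List Int) (j bv bi : Int) :
    l.foldl pvAct (j, bv, bi) =
      match pvFM l with
      | none => (j, bv, bi)
      | some (m, i) => (j + l.length, if bv < m then (m, j + (i : Int)) else (bv, bi)) := by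
  induction l generalizing j bv bi with
  | nil => rfl
  | cons x t ih =>
    have hcons : pvFM (x :: t) =
        match pvFM t with
        | none => some (x, 0)
        | some (m, i) => if x < m then some (m, i + 1) else some (x, 0) := rfl
    rw [List.foldl_cons]
    by_cases hx : x > bv
    · rw [show pvAct (j, bv, bi) x = (j + 1, x, j) from by simp [pvAct, hx], ih, hcons]
      cases hfm : pvFM t with
      | none =>
        have ht : t = [] := by
          cases t with
          | nil => rfl
          | cons a u => exact absurd hfm (pvFM_ne_none a u)
        subst ht
        simp [show bv < x from hx]
      | some p =>
        obtain ⟨m, i⟩ := p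
        by_cases hxm : x < m
        · have h1 : bv < m := by omega
          simp only [hxm, if_true, h1, List.length_cons]
          refine Prod.ext (by push_cast; omega) ?_
          simp
          omega
        · simp only [hxm, if_false, List.length_cons]
          refine Prod.ext (by push_cast; omega) ?_
          simp [hx]
    · rw [show pvAct (j, bv, bi) x = (j + 1, bv, bi) from by simp [pvAct, hx], ih, hcons]
      cases hfm : pvFM t with
      | none =>
        have ht : t = [] := by
          cases t with
          | nil => rfl
          | cons a u => exact absurd hfm (pvFM_ne_none a u)
        subst ht
        simp [show ¬ bv < x from by omega]
      | some p =>
        obtain ⟨m, i⟩ := p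
        by_cases hxm : x < m
        · simp only [hxm, if_true, List.length_cons]
          by_cases hbm : bv < m
          · refine Prod.ext (by push_cast; omega) ?_
            simp [hbm]
            omega
          · refine Prod.ext (by push_cast; omega) ?_
            simp [hbm]
        · have h1 : ¬ bv < x := by omega
          have h2 : ¬ bv < m := by omega
          simp only [hxm, if_false, List.length_cons]
          refine Prod.ext (by push_cast; omega) ?_
          simp [h1, h2]

-- ===== VERDICT (by name: the statement is the Claim_ definition above) =====
theorem questao11_spec : Claim_equal_questao11 := by
  intro lista _hdom hpre
  unfold Spec_questao11
  obtain ⟨x, hxmem, hx1, hx9⟩ : ∃ x ∈ lista, 1 ≤ x ∧ x ≤ 9 := by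
    simpa [Pre_questao11] using hpre
  have hFne : lista.flatMap (fun x => (pvF x).toList) ≠ [] := by
    intro h
    have hnil := List.flatMap_eq_nil_iff.mp h x hxmem
    have : (pvF x).toList ≠ [] := by
      simp only [pvF]
      interval_cases x <;> simp
    exact this hnil
  obtain ⟨f, r, hFr⟩ := List.exists_cons_of_ne_nil hFne
  obtain ⟨m, i, hfm, hmax, hidx⟩ := pvFM_spec r f
  have hA : questao11 lista = (i : Int) := by
    unfold questao11
    rw [show lista.foldl questao11_step [] = lista.flatMap (fun x => (pvF x).toList) from by
      simpa using pvA_list lista []]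
    rw [hFr]
    show (match PySem.List.max? (f :: r) (fun x => x) with
      | none => (0 : Int)
      | some m => (((PySem.List.index? (f :: r) m).getD 0 : Nat) : Int)) = (i : Int)
    rw [PySem.List.max?_id_cons, ← hmax]
    show (((PySem.List.index? (f :: r) m).getD 0 : Nat) : Int) = (i : Int)
    rw [hidx]
    rfl
  have hcons : pvFM (f :: r) =
      match pvFM r with
      | none => some (f, 0)
      | some (m, i) => if f < m then some (m, i + 1) else some (f, 0) := rfl
  have hB : questao11_alt lista = (i : Int) := by
    unfold questao11_alt
    rw [pvB_flat, hFr, List.foldl_cons]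
    show (match (List.foldl (fun (s : Int × Option (Int × Int)) (v : Int) => match s.2 with
          | none => (s.1 + 1, some (v, s.1))
          | some (bv, bi) => (s.1 + 1, if v > bv then some (v, s.1) else some (bv, bi)))
        ((1 : Int), some (f, (0 : Int))) r).2 with
      | none => (0 : Int)
      | some (_, bi) => bi) = (i : Int)
    rw [pvAct_some r 1 f 0, pvAct_spec r 1 f 0]
    cases hr : pvFM r with
    | none =>
      rw [hcons, hr] at hfm
      simp only [Option.some.injEq, Prod.mk.injEq] at hfm
      simp [← hfm.2]
    | some p =>
      obtain ⟨m', i'⟩ := p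
      rw [hcons, hr] at hfm
      by_cases hfm' : f < m'
      · simp only [hfm', if_true, Option.some.injEq, Prod.mk.injEq] at hfm
        obtain ⟨h1, h2⟩ := hfm
        simp only [hfm', if_true]
        show 1 + (i' : Int) = (i : Int)
        omega
      · simp only [hfm', if_false, Option.some.injEq, Prod.mk.injEq] at hfm
        obtain ⟨h1, h2⟩ := hfm
        simp only [hfm', if_false]
        show (0 : Int) = (i : Int)
        omega
  rw [hA, hB]
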